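-- pv_equiv track=rewrite | github.com/bnmnetp/CS160 | 02_RandomNumbers/myrandom.py | search_repeat
-- ===== SOURCE A (Python) =====
-- def find_repeat(seq):
--     guess = 1
--     max_len = len(seq) // 2 + 1
--     for x in range(2, max_len):
--         if seq[0:x] == seq[x:2*x] :
--             guess = x
--
--     return guess
--
-- def search_repeat(seq):
--     best_guess = 0
--     sp = 0
--     for x in range(len(seq)):
--         guess = find_repeat(seq[x:])
--         if guess > 1 and guess > best_guess:
--             best_guess = guess
--             sp = x
--     return best_guess, sp
-- ===== SOURCE B (Python) =====
-- def search_repeat(seq):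
--     # DP on common-prefix lengths of suffix pairs (one row per start, reused
--     # diagonally), replacing A's repeated O(n) slice comparisons: O(n^2) total.
--     n = len(seq)
--     row = [0] * (n + 1)  # row[j] = lcp(seq[i+1:], seq[j+1:]) before the update below
--     guesses = []
--     for i in range(n - 1, -1, -1):
--         row = [row[j + 1] + 1 if seq[i] == seq[j] else 0 for j in range(n)] + [0]
--         g = 1
--         for k in range(2, (n - i) // 2 + 1):
--             if row[i + k] >= k:
--                 g = k
--         guesses = [g] + guesses
--     best_guess = 0
--     sp = 0
--     for x in range(n):
--         if guesses[x] > 1 and guesses[x] > best_guess: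
--             best_guess = guesses[x]
--             sp = x
--     return best_guess, sp
-- ===== Notes on version B (the rewrite author's own statement) =====
-- stated objective: faster
-- what changed: Replaces the per-suffix quadratic slice-comparison search with a dynamic program that builds longest-common-prefix lengths of suffix pairs backwards one row at a time, answering each 'is seq[x:x+k]==seq[x+k:x+2k]' test in O(1).
import Mathlib
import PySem

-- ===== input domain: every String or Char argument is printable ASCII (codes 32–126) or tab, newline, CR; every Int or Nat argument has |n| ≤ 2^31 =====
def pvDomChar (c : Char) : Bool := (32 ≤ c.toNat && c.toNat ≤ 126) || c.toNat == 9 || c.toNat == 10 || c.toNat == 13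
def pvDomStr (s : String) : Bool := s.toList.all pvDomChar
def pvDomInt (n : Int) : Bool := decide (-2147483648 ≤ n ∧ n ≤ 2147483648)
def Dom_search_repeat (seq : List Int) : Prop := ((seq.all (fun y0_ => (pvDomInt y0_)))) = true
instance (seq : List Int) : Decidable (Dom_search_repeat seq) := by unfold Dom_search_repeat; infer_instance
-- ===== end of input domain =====

-- B replaces A's per-suffix quadratic slice comparisons by a backwards DP on
-- longest-common-prefix lengths of suffix pairs (asymptotically faster).

-- ===== PORT A =====
def find_repeat (seq : List Int) : Int :=
  (PySem.List.pyRange 2 (PySem.Int.floordiv (seq.length : Int) 2 + 1) 1).foldl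
    (fun guess x =>
      if PySem.List.slice seq (some 0) (some x) = PySem.List.slice seq (some x) (some (2 * x))
      then x else guess) 1

def search_repeat (seq : List Int) : Int × Int :=
  (PySem.List.pyRange 0 (seq.length : Int) 1).foldl
    (fun bs x =>
      let guess := find_repeat (PySem.List.slice seq (some x) none)
      if guess > 1 ∧ guess > bs.1 then (guess, x) else bs) (0, 0)

-- ===== PORT B =====
-- row update: [row[j+1]+1 if seq[i]==seq[j] else 0 for j in range(n)] + [0]
-- (indices provably in range; pyGetD's default is never used)
def srAltRowStep (seq : List Int) (n : Int) (row : List Int) (i : Int) : List Int :=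
  ((PySem.List.pyRange 0 n 1).map (fun j =>
      if PySem.List.pyGetD seq i 0 = PySem.List.pyGetD seq j 0
      then PySem.List.pyGetD row (j + 1) 0 + 1 else 0)) ++ [0]

-- inner loop: g = 1; for k in range(2, (n-i)//2+1): if row[i+k] >= k: g = k
def srAltGuess (n i : Int) (row : List Int) : Int :=
  (PySem.List.pyRange 2 (PySem.Int.floordiv (n - i) 2 + 1) 1).foldl
    (fun g k => if PySem.List.pyGetD row (i + k) 0 ≥ k then k else g) 1

def search_repeat_alt (seq : List Int) : Int × Int :=
  let n : Int := (seq.length : Int)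
  let st := (PySem.List.pyRange (n - 1) (-1) (-1)).foldl
    (fun (st : List Int × List Int) i =>
      let row := srAltRowStep seq n st.1 i
      (row, [srAltGuess n i row] ++ st.2))
    (List.replicate (seq.length + 1) 0, [])
  let guesses := st.2
  (PySem.List.pyRange 0 n 1).foldl
    (fun bs x =>
      if PySem.List.pyGetD guesses x 0 > 1 ∧ PySem.List.pyGetD guesses x 0 > bs.1
      then (PySem.List.pyGetD guesses x 0, x) else bs) (0, 0)

-- ===== PRECONDITION & SPEC =====
def Spec_search_repeat (seq : List Int) (out : Int × Int) : Prop := out = search_repeat_alt seq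
instance (seq : List Int) (out : Int × Int) : Decidable (Spec_search_repeat seq out) := by unfold Spec_search_repeat; infer_instance

-- ===== CLAIM (what is proved, stated in full; the proofs are below) =====
def Claim_equal_search_repeat : Prop := ∀ (seq : List Int), Dom_search_repeat seq → Spec_search_repeat seq (search_repeat seq)

-- ===== LEMMAS AND PROOFS =====

-- longest common prefix length of two lists
def lcpL : List Int → List Int → Nat
  | a :: as, b :: bs => if a = b then lcpL as bs + 1 else 0
  | _, _ => 0

theorem lcpL_nil_left (b : List Int) : lcpL [] b = 0 := rfl

theorem lcpL_nil_right (a : List Int) : lcpL a [] = 0 := by cases a <;> rfl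

theorem lcpL_ge_iff (k : Nat) (a b : List Int) (ha : k ≤ a.length) (hb : k ≤ b.length) :
    (k ≤ lcpL a b) ↔ a.take k = b.take k := by
  induction k generalizing a b with
  | zero => simp
  | succ k ih =>
    cases a with
    | nil => simp at ha
    | cons x as =>
      cases b with
      | nil => simp at hb
      | cons y bs =>
        by_cases hxy : x = y
        · subst hxy
          rw [show lcpL (x :: as) (x :: bs) = lcpL as bs + 1 from by rw [lcpL, if_pos rfl]]
          simp only [List.take_succ_cons, List.cons.injEq, true_and, Nat.add_le_add_iff_right]
          exact ih as bs (by simpa using ha) (by simpa using hb)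
        · rw [show lcpL (x :: as) (y :: bs) = 0 from by rw [lcpL, if_neg hxy]]
          simp [hxy]

-- the row the DP maintains for start i
def rowF (seq : List Int) (i : Nat) : List Int :=
  ((List.range seq.length).map (fun j => (lcpL (seq.drop i) (seq.drop j) : Int))) ++ [0]

theorem rowF_getD (seq : List Int) (i j : Nat) (hj : j ≤ seq.length) :
    (rowF seq i).getD j 0 = (lcpL (seq.drop i) (seq.drop j) : Int) := by
  rcases Nat.lt_or_eq_of_le hj with h | h
  · rw [rowF, List.getD_eq_getElem?_getD, List.getElem?_append_left (by simpa using h)]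
    simp [h]
  · subst h
    rw [rowF, List.getD_eq_getElem?_getD, List.getElem?_append_right (by simp)]
    simp [lcpL_nil_right, List.drop_length]

theorem lcpL_drop_cons (seq : List Int) (i j : Nat) (hi : i < seq.length) (hj : j < seq.length) :
    lcpL (seq.drop i) (seq.drop j)
      = if seq[i] = seq[j] then lcpL (seq.drop (i + 1)) (seq.drop (j + 1)) + 1 else 0 := by
  rw [List.drop_eq_getElem_cons hi, List.drop_eq_getElem_cons hj]
  rfl

theorem srAltRowStep_rowF (seq : List Int) (i : Nat) (hi : i < seq.length) :
    srAltRowStep seq (seq.length : Int) (rowF seq (i + 1)) (i : Int) = rowF seq i := by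
  rw [srAltRowStep]
  conv_rhs => rw [rowF]
  congr 1
  rw [PySem.List.pyRange_zero_nat, List.map_map]
  apply List.map_congr_left
  intro j hj
  simp only [List.mem_range] at hj
  simp only [Function.comp_apply]
  rw [PySem.List.pyGetD_natCast, PySem.List.pyGetD_natCast]
  rw [show ((j : Int) + 1) = ((j + 1 : Nat) : Int) from by push_cast; ring]
  rw [PySem.List.pyGetD_natCast]
  rw [List.getD_eq_getElem seq 0 hi, List.getD_eq_getElem seq 0 hj]
  rw [rowF_getD seq (i + 1) (j + 1) (by omega)]
  rw [lcpL_drop_cons seq i j hi hj]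
  by_cases h : seq[i] = seq[j] <;> simp [h]

def guessF (seq : List Int) (i : Nat) : Int :=
  srAltGuess (seq.length : Int) (i : Int) (rowF seq i)

theorem srAlt_fold_inv (seq : List Int) (m : Nat) (hm : m ≤ seq.length) (gl : List Int) :
    (PySem.List.pyRange ((m : Int) - 1) (-1) (-1)).foldl
      (fun (st : List Int × List Int) i =>
        let row := srAltRowStep seq (seq.length : Int) st.1 i
        (row, [srAltGuess (seq.length : Int) i row] ++ st.2))
      (rowF seq m, gl)
      = (rowF seq 0, (List.range m).map (guessF seq) ++ gl) := by
  induction m generalizing gl with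
  | zero =>
    rw [PySem.List.pyRange_neg_one_eq_nil (by omega)]
    simp
  | succ m ih =>
    rw [show ((m + 1 : Nat) : Int) - 1 = (m : Int) from by push_cast; ring]
    rw [PySem.List.pyRange_neg_one_cons (by omega), List.foldl_cons]
    have hrow := srAltRowStep_rowF seq m (by omega)
    simp only [hrow]
    rw [ih (by omega)]
    simp [List.range_succ, guessF]

theorem rowF_ge_iff (seq : List Int) (x k : Nat) (h2 : 2 ≤ k) (hk : k ≤ (seq.length - x) / 2) :
    ((k : Int) ≤ (rowF seq x).getD (x + k) 0)
      ↔ (seq.drop x).take k = (seq.drop (x + k)).take k := by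
  have hn : x + 2 * k ≤ seq.length := by omega
  rw [rowF_getD seq x (x + k) (by omega), Nat.cast_le]
  exact lcpL_ge_iff k _ _ (by simp; omega) (by simp; omega)

theorem guessF_eq_find_repeat (seq : List Int) (x : Nat) (hx : x ≤ seq.length) :
    guessF seq x = find_repeat (seq.drop x) := by
  unfold guessF srAltGuess find_repeat
  have hlen : (((seq.drop x).length : Nat) : Int) = (seq.length : Int) - (x : Int) := by
    simp; omega
  rw [hlen]
  apply PySem.List.foldl_congr_mem
  intro acc k hk
  rw [PySem.List.mem_pyRange_one] at hk
  have hfd : PySem.Int.floordiv ((seq.length : Int) - (x : Int)) 2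
      = (((seq.length - x) / 2 : Nat) : Int) := by
    rw [show ((seq.length : Int) - (x : Int)) = ((seq.length - x : Nat) : Int) from by omega]
    exact_mod_cast PySem.Int.floordiv_natCast (seq.length - x) 2
  rw [hfd] at hk
  obtain ⟨hk2, hkb⟩ := hk
  obtain ⟨kn, rfl⟩ : ∃ kn : Nat, k = (kn : Int) := ⟨k.toNat, by omega⟩
  have hk2' : 2 ≤ kn := by exact_mod_cast hk2
  have hkb' : kn ≤ (seq.length - x) / 2 := by omega
  rw [show (x : Int) + (kn : Int) = ((x + kn : Nat) : Int) from by push_cast; ring]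
  rw [PySem.List.pyGetD_natCast]
  have hcond : ((rowF seq x).getD (x + kn) 0 ≥ (kn : Int))
      = (PySem.List.slice (seq.drop x) (some 0) (some (kn : Int))
          = PySem.List.slice (seq.drop x) (some (kn : Int)) (some (2 * (kn : Int)))) := by
    apply propext
    rw [ge_iff_le, rowF_ge_iff seq x kn hk2' hkb']
    rw [show (2 * (kn : Int)) = ((2 * kn : Nat) : Int) from by push_cast; ring]
    rw [PySem.List.slice_natCast, PySem.List.slice_zero_start, PySem.List.slice_to_natCast]
    rw [List.drop_drop, show 2 * kn - kn = kn from by omega]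
  simp only [hcond]

-- ===== VERDICT (by name: the statement is the Claim_ definition above) =====
theorem search_repeat_spec : Claim_equal_search_repeat := by
  intro seq _
  unfold Spec_search_repeat search_repeat search_repeat_alt
  simp only
  have hrep : List.replicate (seq.length + 1) (0 : Int) = rowF seq seq.length := by
    rw [rowF, List.drop_length, List.replicate_succ']
    congr 1
    rw [show (fun j => ((lcpL [] (seq.drop j) : Nat) : Int)) = fun _ => (0 : Int) from by
      funext j; rw [lcpL_nil_left]; rfl]
    simp
  rw [hrep]
  rw [srAlt_fold_inv seq seq.length (le_refl _) []]
  simp only [List.append_nil]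
  apply (PySem.List.foldl_congr_mem _ _ _ _ _).symm
  intro acc x hx
  rw [PySem.List.mem_pyRange_one] at hx
  obtain ⟨hx0, hxn⟩ := hx
  obtain ⟨xn, rfl⟩ : ∃ xn : Nat, x = (xn : Int) := ⟨x.toNat, by omega⟩
  have hxn' : xn < seq.length := by exact_mod_cast hxn
  rw [PySem.List.pyGetD_natCast]
  have hg : ((List.range seq.length).map (guessF seq)).getD xn 0 = guessF seq xn := by
    rw [List.getD_eq_getElem?_getD, List.getElem?_map]
    simp [hxn']
  rw [hg, guessF_eq_find_repeat seq xn (by omega)]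
  rw [PySem.List.slice_from_natCast]
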